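-- pv_equiv track=rewrite | github.com/miliar/Code_Jam_Webscraper | solutions_python/solutions_year12_round0_nr2/823.py | maxGooglers
-- ===== SOURCE A (Python) =====
-- from math import ceil, floor
--
-- def getDist(points, isSurp=False):
-- 	p = floor(points / 3.0)
-- 	trip = [p, p, p]
-- 	if 3*p < points:
-- 		trip[0] += 1
-- 	if (3*p + 1) < points:
-- 		trip[1] += 1
--
-- 	trip.sort(reverse=True)
--
-- 	if isSurp and (trip[1] == trip[0]) and trip[1] > 0:
-- 		trip[1] -= 1
-- 		trip[0] += 1
-- 		trip.sort(reverse=True)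
--
-- 	return trip
--
-- def maxGooglers(nrOfGooglers, surprising, p, points):
-- 	mg = 0
-- 	surp = 0
-- 	for pi in points:
-- 		trip = getDist(pi, True)
-- 		if ceil(pi/3.0) >= p:
-- 			mg += 1
-- 		elif trip[0] >= p:
-- 			surp += 1
--
-- 	mg += min(surp, surprising)
--
-- 	return mg
-- ===== SOURCE B (Python) =====
-- def maxGooglers(nrOfGooglers, surprising, p, points):
--     # A score reaches p without a surprising split iff its best share ceil(pi/3)
--     # is at least p, i.e. pi >= 3*p - 2.  A surprising split raises the best
--     # share by exactly one, and is only possible when that raised share is at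
--     # least 2 (it needs a strictly positive top), so scores in the two-wide
--     # band 3*p - 4 <= pi < 3*p - 2 reach p iff p >= 2 and we spend a surprise.
--     reach = sum(1 for pi in points if pi >= 3 * p - 2)
--     near = sum(1 for pi in points if 3 * p - 4 <= pi < 3 * p - 2) if p >= 2 else 0
--     return reach + min(near, surprising)
-- ===== Notes on version B (the rewrite author's own statement) =====
-- stated objective: alternative
-- what changed: B never computes any per-score distribution: instead of simulating getDist (list build, bumps, two reverse sorts) per element, it counts scores against two closed-form thresholds derived from the problem - pi >= 3p-2 reaches p outright, and the two-wide band 3p-4 <= pi < 3p-2 reaches p only with a surprising split (possible only for p >= 2) - then adds min(band count, surprising).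
import Mathlib
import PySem

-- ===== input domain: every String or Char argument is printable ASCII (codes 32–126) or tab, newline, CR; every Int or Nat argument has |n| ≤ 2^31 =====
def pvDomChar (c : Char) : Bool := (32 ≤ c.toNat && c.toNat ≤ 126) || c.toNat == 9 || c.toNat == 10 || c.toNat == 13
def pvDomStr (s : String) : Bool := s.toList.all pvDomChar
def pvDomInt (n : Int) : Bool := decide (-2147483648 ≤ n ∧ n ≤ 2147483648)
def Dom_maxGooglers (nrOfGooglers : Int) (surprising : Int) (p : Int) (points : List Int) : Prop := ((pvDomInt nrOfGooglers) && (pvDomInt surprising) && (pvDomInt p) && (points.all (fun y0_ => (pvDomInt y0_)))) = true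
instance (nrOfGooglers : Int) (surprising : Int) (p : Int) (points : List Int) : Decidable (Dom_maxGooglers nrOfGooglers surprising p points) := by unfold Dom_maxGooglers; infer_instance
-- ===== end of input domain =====

-- B replaces the per-score distribution simulation (getDist: list build, bumps, two
-- reverse sorts) by counting scores against two closed-form thresholds and taking a min.


-- ===== PORT A =====
-- floor(points/3.0) is ported as integer floor division and ceil(pi/3.0) as -((-pi)//3): exact here,
-- because for |n| ≤ 2^31 the float n/3.0 is within 2^-20 of the true quotient, far closer than the
-- 1/3 gap to the nearest integer, so the float floor/ceil agree with the integer ones.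
def getDist (points : Int) (isSurp : Bool) : List Int :=
  let pq := PySem.Int.floordiv points 3
  let trip : List Int := [pq, pq, pq]
  let trip := if 3 * pq < points then PySem.List.pySetD trip 0 (PySem.List.pyGetD trip 0 0 + 1) else trip
  let trip := if 3 * pq + 1 < points then PySem.List.pySetD trip 1 (PySem.List.pyGetD trip 1 0 + 1) else trip
  let trip := PySem.List.sorted trip (fun x => x) true
  if isSurp = true ∧ PySem.List.pyGetD trip 1 0 = PySem.List.pyGetD trip 0 0 ∧ PySem.List.pyGetD trip 1 0 > 0 then
    let trip := PySem.List.pySetD trip 1 (PySem.List.pyGetD trip 1 0 - 1)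
    let trip := PySem.List.pySetD trip 0 (PySem.List.pyGetD trip 0 0 + 1)
    PySem.List.sorted trip (fun x => x) true
  else trip

def maxGooglers (nrOfGooglers : Int) (surprising : Int) (p : Int) (points : List Int) : Int :=
  let st := points.foldl (fun (acc : Int × Int) pi =>
    let trip := getDist pi true
    if -(PySem.Int.floordiv (-pi) 3) ≥ p then (acc.1 + 1, acc.2)       -- ceil(pi/3.0) >= p
    else if PySem.List.pyGetD trip 0 0 ≥ p then (acc.1, acc.2 + 1)      -- trip[0] >= p
    else acc) (0, 0)
  st.1 + min st.2 surprising

-- ===== PORT B =====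
def maxGooglers_alt (nrOfGooglers : Int) (surprising : Int) (p : Int) (points : List Int) : Int :=
  let reach : Int := (points.countP (fun pi => decide (pi ≥ 3 * p - 2)) : Nat)
  let near : Int :=
    if p ≥ 2 then (points.countP (fun pi => decide (3 * p - 4 ≤ pi ∧ pi < 3 * p - 2)) : Nat)
    else 0
  reach + min near surprising

-- ===== PRECONDITION & SPEC =====
def Spec_maxGooglers (nrOfGooglers : Int) (surprising : Int) (p : Int) (points : List Int) (out : Int) : Prop := out = maxGooglers_alt nrOfGooglers surprising p points
instance (nrOfGooglers : Int) (surprising : Int) (p : Int) (points : List Int) (out : Int) : Decidable (Spec_maxGooglers nrOfGooglers surprising p points out) := by unfold Spec_maxGooglers; infer_instance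

-- ===== CLAIM (what is proved, stated in full; the proofs are below) =====
def Claim_equal_maxGooglers : Prop := ∀ (nrOfGooglers : Int) (surprising : Int) (p : Int) (points : List Int), Dom_maxGooglers nrOfGooglers surprising p points → Spec_maxGooglers nrOfGooglers surprising p points (maxGooglers nrOfGooglers surprising p points)

-- ===== LEMMAS AND PROOFS =====

-- evaluation of pyGetD / pySetD at the literal indices 0 and 1 of a 3-element list
theorem pg0 (a b c d : Int) : PySem.List.pyGetD [a, b, c] 0 d = a := rfl
theorem pg1 (a b c d : Int) : PySem.List.pyGetD [a, b, c] 1 d = b := rfl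
theorem ps0 (a b c v : Int) : PySem.List.pySetD [a, b, c] 0 v = [v, b, c] := rfl
theorem ps1 (a b c v : Int) : PySem.List.pySetD [a, b, c] 1 v = [a, v, c] := rfl

theorem pw3 (a b c : Int) (h1 : b ≤ a) (h2 : c ≤ a) (h3 : c ≤ b) :
    List.Pairwise (fun x y : Int => y ≤ x) [a, b, c] := by
  constructor
  · intro z hz
    rcases List.mem_cons.1 hz with rfl | hz
    · exact h1
    rcases List.mem_cons.1 hz with rfl | hz
    · exact h2
    cases hz
  constructor
  · intro z hz
    rcases List.mem_cons.1 hz with rfl | hz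
    · exact h3
    cases hz
  exact List.pairwise_singleton _ _

theorem pw3lt (a b c : Int) (h1 : b < a) (h2 : c < a) (h3 : c < b) :
    List.Pairwise (fun x y : Int => y < x) [a, b, c] := by
  constructor
  · intro z hz
    rcases List.mem_cons.1 hz with rfl | hz
    · exact h1
    rcases List.mem_cons.1 hz with rfl | hz
    · exact h2
    cases hz
  constructor
  · intro z hz
    rcases List.mem_cons.1 hz with rfl | hz
    · exact h3
    cases hz
  exact List.pairwise_singleton _ _

-- reverse-sorting a 3-element list that is already weakly decreasing is the identity
theorem srt3 (a b c : Int) (h1 : b ≤ a) (h2 : c ≤ a) (h3 : c ≤ b) :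
    PySem.List.sorted [a, b, c] (fun x => x) true = [a, b, c] :=
  PySem.List.sorted_rev_eq_self_of_pairwise [a, b, c] (fun x => x) (pw3 a b c h1 h2 h3)

-- trip[0] of getDist pi True as a closed form over floordiv/mod
theorem getDist_head (pi : Int) :
    PySem.List.pyGetD (getDist pi true) 0 0 =
      (let q := PySem.Int.floordiv pi 3
       let r := PySem.Int.mod pi 3
       if r = 0 then (if q > 0 then q + 1 else q)
       else if r = 1 then q + 1
       else (if q ≥ 0 then q + 2 else q + 1)) := by
  rw [getDist]
  simp only [PySem.Int.floordiv_eq_ediv_of_pos (by norm_num : (0:Int) < 3),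
      PySem.Int.mod_eq_emod_of_pos (by norm_num : (0:Int) < 3)]
  set q := pi / 3 with hq
  have hr : pi % 3 = 0 ∨ pi % 3 = 1 ∨ pi % 3 = 2 := by omega
  rcases hr with h | h | h
  · have h1 : ¬ (3 * q < pi) := by omega
    have h2 : ¬ (3 * q + 1 < pi) := by omega
    simp only [if_neg h1, if_neg h2, srt3 q q q le_rfl le_rfl le_rfl, pg0, pg1, ps0, ps1]
    by_cases hq0 : q > 0
    · rw [if_pos (show True ∧ True ∧ q > 0 from ⟨trivial, trivial, hq0⟩)]
      rw [show PySem.List.sorted [q + 1, q - 1, q] (fun x => x) true = [q + 1, q, q - 1] from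
        PySem.List.sorted_rev_eq_of_perm_of_pairwise_gt [q + 1, q - 1, q] [q + 1, q, q - 1]
          (fun x => x) (List.Perm.cons _ (List.Perm.swap _ _ _))
          (pw3lt (q + 1) q (q - 1) (by omega) (by omega) (by omega))]
      rw [pg0, if_pos h, if_pos hq0]
    · rw [if_neg (by simp [hq0])]
      rw [pg0, if_pos h, if_neg hq0]
  · have h1 : 3 * q < pi := by omega
    have h2 : ¬ (3 * q + 1 < pi) := by omega
    simp only [if_pos h1, if_neg h2, pg0, pg1, ps0, ps1]
    rw [srt3 (q + 1) q q (by omega) (by omega) le_rfl]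
    simp only [pg0, pg1]
    rw [if_neg (by rintro ⟨-, he, -⟩; omega)]
    rw [if_neg (by omega), if_pos h, pg0]
  · have h1 : 3 * q < pi := by omega
    have h2 : 3 * q + 1 < pi := by omega
    simp only [if_pos h1, if_pos h2, pg0, pg1, ps0, ps1]
    rw [srt3 (q + 1) (q + 1) q le_rfl (by omega) (by omega)]
    simp only [pg0, pg1, ps0, ps1]
    by_cases hq0 : q ≥ 0
    · rw [if_pos (show True ∧ True ∧ q + 1 > 0 from ⟨trivial, trivial, by omega⟩)]
      have he1 : q + 1 - 1 = q := by omega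
      have he2 : q + 1 + 1 = q + 2 := by omega
      rw [he1, he2]
      rw [srt3 (q + 2) q q (by omega) (by omega) le_rfl]
      rw [pg0, if_neg (by omega), if_neg (by omega), if_pos hq0]
    · rw [if_neg (by rintro ⟨-, -, hc⟩; omega)]
      rw [pg0, if_neg (by omega), if_neg (by omega), if_neg hq0]

-- the ported ceil(pi/3.0) ≥ p is the threshold pi ≥ 3p-2
theorem cond1_iff (p pi : Int) : (-(PySem.Int.floordiv (-pi) 3) ≥ p) ↔ pi ≥ 3 * p - 2 := by
  rw [PySem.Int.floordiv_eq_ediv_of_pos (by norm_num : (0:Int) < 3)]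
  omega

-- the elif branch (not reaching p outright, but trip[0] ≥ p) is exactly the surprise band
theorem cond2_iff (p pi : Int) :
    (¬ (-(PySem.Int.floordiv (-pi) 3) ≥ p) ∧ PySem.List.pyGetD (getDist pi true) 0 0 ≥ p) ↔
      (2 ≤ p ∧ 3 * p - 4 ≤ pi ∧ pi < 3 * p - 2) := by
  rw [cond1_iff, getDist_head]
  simp only [PySem.Int.floordiv_eq_ediv_of_pos (by norm_num : (0:Int) < 3),
      PySem.Int.mod_eq_emod_of_pos (by norm_num : (0:Int) < 3)]
  have hr : pi % 3 = 0 ∨ pi % 3 = 1 ∨ pi % 3 = 2 := by omega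
  rcases hr with h | h | h <;> simp only [h] <;> split_ifs <;> omega

-- A's fold accumulates exactly the two threshold counts
theorem fold_counts (p : Int) (points : List Int) : ∀ (acc : Int × Int),
    points.foldl (fun (acc : Int × Int) pi =>
      let trip := getDist pi true
      if -(PySem.Int.floordiv (-pi) 3) ≥ p then (acc.1 + 1, acc.2)
      else if PySem.List.pyGetD trip 0 0 ≥ p then (acc.1, acc.2 + 1)
      else acc) acc =
    (acc.1 + (points.countP (fun pi => decide (pi ≥ 3 * p - 2)) : Nat),
     acc.2 + (points.countP (fun pi => decide (2 ≤ p ∧ 3 * p - 4 ≤ pi ∧ pi < 3 * p - 2)) : Nat)) := by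
  induction points with
  | nil => intro acc; simp
  | cons x xs ih =>
    intro acc
    simp only [List.foldl_cons, List.countP_cons]
    by_cases h1 : -(PySem.Int.floordiv (-x) 3) ≥ p
    · have hc1 : decide (x ≥ 3 * p - 2) = true := decide_eq_true ((cond1_iff p x).1 h1)
      have hc2 : decide (2 ≤ p ∧ 3 * p - 4 ≤ x ∧ x < 3 * p - 2) = false := by
        refine decide_eq_false ?_
        intro hb
        exact absurd ((cond1_iff p x).1 h1) (by omega)
      rw [if_pos h1, ih]
      simp only [hc1, hc2, Prod.mk.injEq]
      constructor <;> push_cast <;> ring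
    · by_cases h2 : PySem.List.pyGetD (getDist x true) 0 0 ≥ p
      · have hb := (cond2_iff p x).1 ⟨h1, h2⟩
        have hc1 : decide (x ≥ 3 * p - 2) = false :=
          decide_eq_false (fun hx => h1 ((cond1_iff p x).2 hx))
        have hc2 : decide (2 ≤ p ∧ 3 * p - 4 ≤ x ∧ x < 3 * p - 2) = true := decide_eq_true hb
        rw [if_neg h1, if_pos h2, ih]
        simp only [hc1, hc2, Prod.mk.injEq]
        constructor <;> push_cast <;> ring
      · have hc1 : decide (x ≥ 3 * p - 2) = false :=
          decide_eq_false (fun hx => h1 ((cond1_iff p x).2 hx))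
        have hc2 : decide (2 ≤ p ∧ 3 * p - 4 ≤ x ∧ x < 3 * p - 2) = false :=
          decide_eq_false (fun hb => h2 ((cond2_iff p x).2 hb).2)
        rw [if_neg h1, if_neg h2, ih]
        simp only [hc1, hc2, Prod.mk.injEq]
        constructor <;> push_cast <;> ring

-- when p < 2 the band predicate counts nothing
theorem count_band_zero (p : Int) (points : List Int) (hp : ¬ p ≥ 2) :
    points.countP (fun pi => decide (2 ≤ p ∧ 3 * p - 4 ≤ pi ∧ pi < 3 * p - 2)) = 0 := by
  rw [List.countP_eq_zero]
  intro x _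
  simp only [decide_eq_true_eq]
  intro hb
  exact hp hb.1

theorem maxGooglers_eq_alt (nrOfGooglers surprising p : Int) (points : List Int) :
    maxGooglers nrOfGooglers surprising p points = maxGooglers_alt nrOfGooglers surprising p points := by
  unfold maxGooglers maxGooglers_alt
  rw [fold_counts p points (0, 0)]
  dsimp only
  by_cases hp : p ≥ 2
  · have hcc : (points.countP (fun pi => decide (2 ≤ p ∧ 3 * p - 4 ≤ pi ∧ pi < 3 * p - 2))) =
        (points.countP (fun pi => decide (3 * p - 4 ≤ pi ∧ pi < 3 * p - 2))) := by
      apply List.countP_congr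
      intro x _
      simp only [decide_eq_true_eq]
      exact ⟨fun h => h.2, fun h => ⟨hp, h⟩⟩
    rw [if_pos hp, hcc]
    omega
  · rw [if_neg hp, count_band_zero p points hp]
    omega

-- ===== VERDICT (by name: the statement is the Claim_ definition above) =====
theorem maxGooglers_spec : Claim_equal_maxGooglers := by
  intro nrOfGooglers surprising p points _
  unfold Spec_maxGooglers
  exact maxGooglers_eq_alt nrOfGooglers surprising p points
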